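-- pv_equiv track=rewrite | github.com/avresort0-oss/SmartSafe_V27_PRODUCTION | ui/tabs/profile_checker_tab.py | get_timezone_from_number
-- ===== SOURCE A (Python) =====
-- def get_timezone_from_number(phone: str) -> str:
--     """Estimate timezone from phone number prefix"""
--     # Common country codes and their timezones
--     timezone_map = {
--         "880": "Asia/Dhaka",      # Bangladesh
--         "880": "Asia/Dhaka",      # Bangladesh
--         "88": "Asia/Dhaka",       # BD shorthand
--         "91": "Asia/Kolkata",     # India
--         "92": "Asia/Karachi",     # Pakistan
--         "93": "Asia/Kabul",       # Afghanistan
--         "94": "Asia/Colombo",     # Sri Lanka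
--         "1": "America/New_York",  # USA/Canada
--         "44": "Europe/London",    # UK
--         "33": "Europe/Paris",     # France
--         "49": "Europe/Berlin",    # Germany
--         "39": "Europe/Rome",      # Italy
--         "34": "Europe/Madrid",    # Spain
--         "61": "Australia/Sydney", # Australia
--         "81": "Asia/Tokyo",       # Japan
--         "86": "Asia/Shanghai",    # China
--     }
--
--     # Try to match country code
--     for code, tz in timezone_map.items():
--         if phone.startswith("+"+code) or phone.startswith(code):
--             return tz
--
--     return "Unknown"
-- ===== SOURCE B (Python) =====
-- def get_timezone_from_number(phone: str) -> str:
--     """Estimate timezone from phone number prefix"""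
--     timezone_map = {
--         "880": "Asia/Dhaka",      # Bangladesh
--         "88": "Asia/Dhaka",       # BD shorthand
--         "91": "Asia/Kolkata",     # India
--         "92": "Asia/Karachi",     # Pakistan
--         "93": "Asia/Kabul",       # Afghanistan
--         "94": "Asia/Colombo",     # Sri Lanka
--         "1": "America/New_York",  # USA/Canada
--         "44": "Europe/London",    # UK
--         "33": "Europe/Paris",     # France
--         "49": "Europe/Berlin",    # Germany
--         "39": "Europe/Rome",      # Italy
--         "34": "Europe/Madrid",    # Spain
--         "61": "Australia/Sydney", # Australia
--         "81": "Asia/Tokyo",       # Japan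
--         "86": "Asia/Shanghai",    # China
--     }
--     # strip exactly one leading '+', then longest-prefix hash lookup (lengths 3, 2, 1)
--     s = phone[1:] if phone.startswith("+") else phone
--     for length in (3, 2, 1):
--         tz = timezone_map.get(s[:length])
--         if tz is not None:
--             return tz
--     return "Unknown"
-- ===== Notes on version B (the rewrite author's own statement) =====
-- stated objective: idiomatic
-- what changed: B strips exactly one leading '+' and does hash lookups of the 3-, 2- and 1-character prefixes (longest first) instead of A's linear startswith scan over all dict entries; exact because the only overlapping codes 880/88 map to the same timezone.
import Mathlib
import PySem

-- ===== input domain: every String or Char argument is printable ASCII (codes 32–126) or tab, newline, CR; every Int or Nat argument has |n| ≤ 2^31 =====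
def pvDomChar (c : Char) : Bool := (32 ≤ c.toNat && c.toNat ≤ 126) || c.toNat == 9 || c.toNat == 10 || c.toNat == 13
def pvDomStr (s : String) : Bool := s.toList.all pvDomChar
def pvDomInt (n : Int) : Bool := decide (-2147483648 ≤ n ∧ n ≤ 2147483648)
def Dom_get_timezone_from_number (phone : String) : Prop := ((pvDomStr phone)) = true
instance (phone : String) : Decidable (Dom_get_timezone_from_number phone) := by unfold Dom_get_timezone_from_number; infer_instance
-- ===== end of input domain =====

-- B replaces A's linear startswith scan over the dict entries by stripping one leading '+' and
-- doing longest-prefix dict lookups for the prefix lengths 3, 2, 1; same return value everywhere.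

-- the timezone_map dict literal shared by both sources (A's literal repeats the key "880";
-- PySem.Dict.ofList reproduces Python's overwrite-in-place)
def pvTimezonePairs : List (String × String) :=
  [("880", "Asia/Dhaka"), ("880", "Asia/Dhaka"), ("88", "Asia/Dhaka"),
   ("91", "Asia/Kolkata"), ("92", "Asia/Karachi"), ("93", "Asia/Kabul"),
   ("94", "Asia/Colombo"), ("1", "America/New_York"), ("44", "Europe/London"),
   ("33", "Europe/Paris"), ("49", "Europe/Berlin"), ("39", "Europe/Rome"),
   ("34", "Europe/Madrid"), ("61", "Australia/Sydney"), ("81", "Asia/Tokyo"),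
   ("86", "Asia/Shanghai")]

-- ===== PORT A =====
-- 'for code, tz in timezone_map.items(): if phone.startswith("+"+code) or phone.startswith(code): return tz'
def pvScanA (phone : String) : List (String × String) → String
  | [] => "Unknown"
  | (code, tz) :: rest =>
    if PySem.Str.startswith phone ("+" ++ code) || PySem.Str.startswith phone code then tz
    else pvScanA phone rest

def get_timezone_from_number (phone : String) : String :=
  let timezone_map : PySem.Dict String String := PySem.Dict.ofList pvTimezonePairs
  pvScanA phone timezone_map.items

-- ===== PORT B =====
-- 'for length in (3, 2, 1): tz = timezone_map.get(s[:length]); if tz is not None: return tz'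
def pvTryLengths (timezone_map : PySem.Dict String String) (s : String) : List Int → String
  | [] => "Unknown"
  | length :: rest =>
    match timezone_map.get? (PySem.Str.slice s none (some length)) with
    | some tz => tz
    | none => pvTryLengths timezone_map s rest

def get_timezone_from_number_alt (phone : String) : String :=
  let timezone_map : PySem.Dict String String := PySem.Dict.ofList pvTimezonePairs
  let s := if PySem.Str.startswith phone "+" then PySem.Str.slice phone (some 1) none else phone
  pvTryLengths timezone_map s [3, 2, 1]

-- ===== PRECONDITION & SPEC =====
def Spec_get_timezone_from_number (phone : String) (out : String) : Prop := out = get_timezone_from_number_alt phone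
instance (phone : String) (out : String) : Decidable (Spec_get_timezone_from_number phone out) := by unfold Spec_get_timezone_from_number; infer_instance

-- ===== CLAIM (what is proved, stated in full; the proofs are below) =====
def Claim_equal_get_timezone_from_number : Prop := ∀ (phone : String), Dom_get_timezone_from_number phone → Spec_get_timezone_from_number phone (get_timezone_from_number phone)

-- ===== LEMMAS AND PROOFS =====

-- strip exactly one leading '+'
def pvStrip : List Char → List Char
  | [] => []
  | c :: r => if c = '+' then r else c :: r

-- timezone_map.get on a key given as a char list
def pvGetLit (m : List Char) : Option String :=
  if ['8','8','0'] = m then some "Asia/Dhaka" else if ['8','8'] = m then some "Asia/Dhaka"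
  else if ['9','1'] = m then some "Asia/Kolkata" else if ['9','2'] = m then some "Asia/Karachi"
  else if ['9','3'] = m then some "Asia/Kabul" else if ['9','4'] = m then some "Asia/Colombo"
  else if ['1'] = m then some "America/New_York" else if ['4','4'] = m then some "Europe/London"
  else if ['3','3'] = m then some "Europe/Paris" else if ['4','9'] = m then some "Europe/Berlin"
  else if ['3','9'] = m then some "Europe/Rome" else if ['3','4'] = m then some "Europe/Madrid"
  else if ['6','1'] = m then some "Australia/Sydney" else if ['8','1'] = m then some "Asia/Tokyo"
  else if ['8','6'] = m then some "Asia/Shanghai" else none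

-- A's scan, after the '+' has been stripped, as a chain of prefix tests on the char list
def pvA (s : List Char) : String :=
  if ['8','8','0'] = s.take 3 then "Asia/Dhaka" else if ['8','8'] = s.take 2 then "Asia/Dhaka"
  else if ['9','1'] = s.take 2 then "Asia/Kolkata" else if ['9','2'] = s.take 2 then "Asia/Karachi"
  else if ['9','3'] = s.take 2 then "Asia/Kabul" else if ['9','4'] = s.take 2 then "Asia/Colombo"
  else if ['1'] = s.take 1 then "America/New_York" else if ['4','4'] = s.take 2 then "Europe/London"
  else if ['3','3'] = s.take 2 then "Europe/Paris" else if ['4','9'] = s.take 2 then "Europe/Berlin"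
  else if ['3','9'] = s.take 2 then "Europe/Rome" else if ['3','4'] = s.take 2 then "Europe/Madrid"
  else if ['6','1'] = s.take 2 then "Australia/Sydney" else if ['8','1'] = s.take 2 then "Asia/Tokyo"
  else if ['8','6'] = s.take 2 then "Asia/Shanghai" else "Unknown"

-- 'tz if tz is not None else continue', as a function of the Optional lookup result
def pvStep (o : Option String) (k : String) : String :=
  match o with
  | some tz => tz
  | none => k

-- B's lookups, after the '+' has been stripped, on the char list
def pvB (s : List Char) : String :=
  pvStep (pvGetLit (s.take 3)) (pvStep (pvGetLit (s.take 2)) (pvStep (pvGetLit (s.take 1)) "Unknown"))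

lemma pvStep_if (c : Prop) [Decidable c] (x : String) (o : Option String) (k : String) :
    pvStep (if c then some x else o) k = if c then x else pvStep o k := by
  split_ifs <;> rfl

lemma pvStep_none (k : String) : pvStep none k = k := rfl

lemma pvStep_idem (o : Option String) (k : String) : pvStep o (pvStep o k) = pvStep o k := by
  cases o <;> rfl

-- the dict literal after Python's duplicate-key overwrite: one "880" entry, in place
set_option maxHeartbeats 1000000 in
lemma pv_items_eq : (PySem.Dict.ofList pvTimezonePairs).items =
  [("880", "Asia/Dhaka"), ("88", "Asia/Dhaka"),
   ("91", "Asia/Kolkata"), ("92", "Asia/Karachi"), ("93", "Asia/Kabul"),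
   ("94", "Asia/Colombo"), ("1", "America/New_York"), ("44", "Europe/London"),
   ("33", "Europe/Paris"), ("49", "Europe/Berlin"), ("39", "Europe/Rome"),
   ("34", "Europe/Madrid"), ("61", "Australia/Sydney"), ("81", "Asia/Tokyo"),
   ("86", "Asia/Shanghai")] := by
  simp [pvTimezonePairs, PySem.Dict.ofList, PySem.Dict.update, PySem.Dict.insert,
    PySem.Dict.empty, PySem.Dict.contains]

@[simp] lemma pv_eq_ofList_iff (s : String) (l : List Char) : (s = String.ofList l) ↔ s.toList = l := by
  constructor
  · intro h; rw [h]; simp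
  · intro h; rw [← h]; simp

-- closed characterization of timezone_map.get on a key given as a char list
set_option maxHeartbeats 1000000 in
lemma pv_get?_lit (m : List Char) :
    (PySem.Dict.ofList pvTimezonePairs).get? (String.ofList m) = pvGetLit m := by
  have hd : PySem.Dict.ofList pvTimezonePairs = PySem.Dict.mk
    [("880", "Asia/Dhaka"), ("88", "Asia/Dhaka"),
     ("91", "Asia/Kolkata"), ("92", "Asia/Karachi"), ("93", "Asia/Kabul"),
     ("94", "Asia/Colombo"), ("1", "America/New_York"), ("44", "Europe/London"),
     ("33", "Europe/Paris"), ("49", "Europe/Berlin"), ("39", "Europe/Rome"),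
     ("34", "Europe/Madrid"), ("61", "Australia/Sydney"), ("81", "Asia/Tokyo"),
     ("86", "Asia/Shanghai")] := PySem.Dict.ext pv_items_eq
  rw [hd]
  simp only [PySem.Dict.get?_mk_cons, beq_iff_eq, pv_eq_ofList_iff]
  simp [pvGetLit, PySem.Dict.get?, List.find?]

-- the normalized phone: strip exactly one leading '+'
lemma pv_strip_eq (l : List Char) :
    (if PySem.Str.startswith (String.ofList l) "+" then
        PySem.Str.slice (String.ofList l) (some 1) none
      else String.ofList l) = String.ofList (pvStrip l) := by
  rcases l with _ | ⟨a, r⟩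
  · decide
  · by_cases ha : a = '+'
    · subst ha
      simp [pvStrip, PySem.Str.startswith_eq, PySem.Chars.startswith, List.isPrefixOf,
        PySem.Str.slice, PySem.List.slice_from_one]
    · simp [pvStrip, ha, PySem.Str.startswith_eq, PySem.Chars.startswith, List.isPrefixOf,
        Ne.symm ha]

-- Port A computes pvA of the stripped list
lemma pv_A_eq (l : List Char) :
    get_timezone_from_number (String.ofList l) = pvA (pvStrip l) := by
  rcases l with _ | ⟨a, r⟩
  · decide
  · by_cases ha : a = '+'
    · subst ha
      simp [get_timezone_from_number, pvScanA, pvStrip, pvA, pv_items_eq,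
        PySem.Str.startswith_eq, PySem.Chars.startswith,
        List.isPrefixOf_iff_prefix, List.prefix_iff_eq_take]
    · simp [get_timezone_from_number, pvScanA, pvStrip, pvA, pv_items_eq, ha, Ne.symm ha,
        PySem.Str.startswith_eq, PySem.Chars.startswith,
        List.isPrefixOf_iff_prefix, List.prefix_iff_eq_take]

-- Port B computes pvB of the stripped list
lemma pv_B_eq (l : List Char) :
    get_timezone_from_number_alt (String.ofList l) = pvB (pvStrip l) := by
  have hsl : ∀ (m : List Char) (n : Nat),
      PySem.Str.slice (String.ofList m) none (some (n : Int)) = String.ofList (m.take n) := by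
    intro m n
    simp [PySem.Str.slice, PySem.List.slice_to_natCast]
  simp only [get_timezone_from_number_alt, pvTryLengths, pvB]
  rw [pv_strip_eq]
  rw [show ((3 : Int)) = ((3 : Nat) : Int) from rfl, show ((2 : Int)) = ((2 : Nat) : Int) from rfl,
    show ((1 : Int)) = ((1 : Nat) : Int) from rfl]
  rw [hsl (pvStrip l) 3, hsl (pvStrip l) 2, hsl (pvStrip l) 1]
  rw [pv_get?_lit, pv_get?_lit, pv_get?_lit]
  rfl

-- the two chains agree on every char list
set_option maxHeartbeats 2000000 in
lemma pv_AB (s : List Char) : pvA s = pvB s := by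
  rcases s with _ | ⟨a, _ | ⟨b, _ | ⟨c, t⟩⟩⟩
  · decide
  · simp only [pvA, pvB]
    norm_num [List.take_succ_cons, List.take_zero, List.take_nil]
    try simp only [pvStep_idem]
    simp only [pvGetLit, pvStep_if, pvStep_none]
    norm_num [List.cons_ne_nil]
  · simp only [pvA, pvB]
    norm_num [List.take_succ_cons, List.take_zero, List.take_nil]
    try simp only [pvStep_idem]
    simp only [pvGetLit, pvStep_if, pvStep_none]
    try norm_num [List.cons_ne_nil]
    rcases eq_or_ne ('1' : Char) a with h1 | h1
    · subst h1
      simp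
    · simp only [if_neg h1]
      try rfl
  · simp only [pvA, pvB]
    norm_num [List.take_succ_cons, List.take_zero, List.take_nil]
    try simp only [pvStep_idem]
    simp only [pvGetLit, pvStep_if, pvStep_none]
    try norm_num [List.cons_ne_nil]
    rcases eq_or_ne ('1' : Char) a with h1 | h1
    · subst h1
      simp
    · simp only [if_neg h1]
      try rfl

-- ===== VERDICT (by name: the statement is the Claim_ definition above) =====
theorem get_timezone_from_number_spec : Claim_equal_get_timezone_from_number := by
  intro phone _
  unfold Spec_get_timezone_from_number
  have h1 := pv_A_eq phone.toList
  have h2 := pv_B_eq phone.toList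
  have h3 := pv_AB (pvStrip phone.toList)
  rw [String.ofList_toList] at h1 h2
  rw [h1, h2, h3]
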